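-- pv_equiv track=rewrite | github.com/PetrickBateman/EGE2025 | 25-02-25/task-25-3090.py | f
-- ===== SOURCE A (Python) =====
-- def is_prime(num):
--     if num == 1:
--         return False
--     for i in range(2, int(num ** 0.5) + 1):
--         if num % i == 0:
--             return False
--     return True
--
-- def f(num):
--     res = set()
--     for i in range(1, int(num ** 0.5) + 1):
--         if num % i == 0:
--             res |= {i, num // i}
--     res = sorted(res)
--
--     P = [i for i in res if is_prime(i)]
--     E = [i for i in res if i % 2 == 0]
--     M = abs(sum(P) - sum(E))
--     if len(P) == len(E):
--         return M
--     return 0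
-- ===== SOURCE B (Python) =====
-- def is_prime(num):
--     if num == 1:
--         return False
--     for i in range(2, int(num ** 0.5) + 1):
--         if num % i == 0:
--             return False
--     return True
--
-- def f(num):
--     # prime factorization of num by trial division
--     m = num
--     fac = []
--     p = 2
--     while p * p <= m:
--         if m % p == 0:
--             e = 0
--             while m % p == 0:
--                 m //= p
--                 e += 1
--             fac.append((p, e))
--         p += 1
--     if m > 1:
--         fac.append((m, 1))
--     # multiply out all divisors from the factorization
--     divs = [1] if num > 0 else []
--     for p, e in fac:
--         divs = [d * p ** k for d in divs for k in range(e + 1)]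
--     P = [d for d in divs if is_prime(d)]
--     E = [d for d in divs if d % 2 == 0]
--     return abs(sum(P) - sum(E)) if len(P) == len(E) else 0
-- ===== Notes on version B (the rewrite author's own statement) =====
-- stated objective: alternative
-- what changed: B never enumerates candidate divisors pairwise: it computes the prime factorization of num by trial division, multiplies the factorization out into the divisor list, and then applies the same is_prime/even classification, replacing A's sqrt-pairing loop, set and sort.
import Mathlib
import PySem

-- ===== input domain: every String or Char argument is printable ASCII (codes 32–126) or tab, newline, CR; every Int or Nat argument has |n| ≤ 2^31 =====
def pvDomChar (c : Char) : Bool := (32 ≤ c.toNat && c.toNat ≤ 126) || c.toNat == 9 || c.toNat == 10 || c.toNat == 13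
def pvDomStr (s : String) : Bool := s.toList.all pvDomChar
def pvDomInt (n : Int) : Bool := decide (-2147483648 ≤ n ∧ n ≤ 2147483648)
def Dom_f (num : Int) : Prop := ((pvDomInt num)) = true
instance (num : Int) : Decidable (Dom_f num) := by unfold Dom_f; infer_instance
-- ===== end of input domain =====

-- B replaces A's sqrt-bounded pairing loop + set + sort by a different algorithm: factorize
-- num by trial division, multiply the factorization out into the divisor list, then apply the
-- same is_prime/even classification (objective: alternative; same cost class).

-- ===== PORT A =====
-- int(num ** 0.5): exact integer square root on the sampled nonnegative domain (|num| ≤ 2^31)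
def pvSqrt (num : Int) : Int := (Nat.sqrt num.toNat : Int)

-- shared helper: the module's is_prime, used verbatim by both A and B
def is_prime (num : Int) : Bool :=
  if num = 1 then false
  else (PySem.List.pyRange 2 (pvSqrt num + 1) 1).all (fun i => !(PySem.Int.mod num i == 0))

def f (num : Int) : Int :=
  let res : PySem.Set Int :=
    (PySem.List.pyRange 1 (pvSqrt num + 1) 1).foldl
      (fun r i =>
        if PySem.Int.mod num i == 0 then
          PySem.Set.add (PySem.Set.add r i) (PySem.Int.floordiv num i)
        else r)
      PySem.Set.empty
  let res' := PySem.List.sorted res (fun x => x) false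
  let P := res'.filter (fun i => is_prime i)
  let E := res'.filter (fun i => PySem.Int.mod i 2 == 0)
  let M := |P.sum - E.sum|
  if P.length = E.length then M else 0

-- ===== PORT B =====
-- B-side helpers: pvStrip is the inner 'while m % p == 0' loop, pvFacAux the outer trial-
-- division loop, genStep one pass of the divisor-list comprehension.
-- The Nat 'fuel' argument is a pure totality device: each loop is entered with fuel larger
-- than its iteration count (m.toNat resp. (m+2).toNat), so the fuel never runs out on the
-- executed path and the functions compute exactly the Python loops.
def pvStrip (p m e : Int) (fuel : Nat) : Int × Int :=
  match fuel with
  | 0 => (e, m)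
  | fuel + 1 =>
    if PySem.Int.mod m p == 0 then pvStrip p (PySem.Int.floordiv m p) (e + 1) fuel
    else (e, m)

def pvFacAux (p m : Int) (fac : List (Int × Int)) (fuel : Nat) : List (Int × Int) × Int :=
  match fuel with
  | 0 => (fac, m)
  | fuel + 1 =>
    if p * p ≤ m then
      if PySem.Int.mod m p == 0 then
        let r := pvStrip p m 0 m.toNat
        pvFacAux (p + 1) r.2 (fac ++ [(p, r.1)]) fuel
      else pvFacAux (p + 1) m fac fuel
    else (fac, m)

-- one pass of '[d * p ** k for d in divs for k in range(e + 1)]'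
-- ('pe.1 ^ k.toNat' = Python's 'p ** k': every k drawn from range(0, e+1) is ≥ 0)
def genStep (acc : List Int) (pe : Int × Int) : List Int :=
  acc.flatMap (fun d => (PySem.List.pyRange 0 (pe.2 + 1) 1).map (fun k => d * pe.1 ^ k.toNat))

def f_alt (num : Int) : Int :=
  let r := pvFacAux 2 num [] (num + 2).toNat
  let fac := if 1 < r.2 then r.1 ++ [(r.2, 1)] else r.1
  let divs := fac.foldl genStep (if 0 < num then [1] else [])
  let P := divs.filter (fun d => is_prime d)
  let E := divs.filter (fun d => PySem.Int.mod d 2 == 0)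
  if P.length = E.length then |P.sum - E.sum| else 0

-- ===== PRECONDITION & SPEC =====
-- Pre_ excludes negative num, on which A raises TypeError (int() of the complex num ** 0.5).
def Pre_f (num : Int) : Prop := 0 ≤ num
instance (num : Int) : Decidable (Pre_f num) := by unfold Pre_f; infer_instance
def pvWitness_f : Int := 36

def Spec_f (num : Int) (out : Int) : Prop := out = f_alt num
instance (num : Int) (out : Int) : Decidable (Spec_f num out) := by unfold Spec_f; infer_instance

-- ===== CLAIM (what is proved, stated in full; the proofs are below) =====
def Claim_equal_f : Prop := ∀ (num : Int), Dom_f num → Pre_f num → Spec_f num (f num)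

-- ===== LEMMAS AND PROOFS =====

-- A's loop body, named for the proofs
def stepA (n : Int) (r : PySem.Set Int) (i : Int) : PySem.Set Int :=
  if PySem.Int.mod n i == 0 then PySem.Set.add (PySem.Set.add r i) (PySem.Int.floordiv n i) else r

-- the divisors A's index i contributes, in the order A meets them
def pairL (n i : Int) : List Int :=
  if PySem.Int.floordiv n i = i then [i] else [i, PySem.Int.floordiv n i]

-- all divisors A meets from index a on, in traversal order
def divL (n a : Int) : List Int :=
  (PySem.List.pyRange a (pvSqrt n + 1) 1).flatMap
    (fun i => if PySem.Int.mod n i == 0 then pairL n i else [])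

lemma pvSqrt_nonneg (n : Int) : 0 ≤ pvSqrt n := by
  simp [pvSqrt]

lemma pvSqrt_mul_le (n : Int) (hn : 0 ≤ n) : pvSqrt n * pvSqrt n ≤ n := by
  have h : ((Nat.sqrt n.toNat * Nat.sqrt n.toNat : Nat) : Int) ≤ (n.toNat : Int) :=
    Int.ofNat_le.mpr (Nat.sqrt_le n.toNat)
  have h2 := Int.toNat_of_nonneg hn
  simp only [pvSqrt]
  push_cast at h
  omega

lemma lt_pvSqrt_succ (n : Int) (hn : 0 ≤ n) : n < (pvSqrt n + 1) * (pvSqrt n + 1) := by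
  have h : (n.toNat : Int) < ((Nat.succ (Nat.sqrt n.toNat) * Nat.succ (Nat.sqrt n.toNat) : Nat) : Int) :=
    Int.ofNat_lt.mpr (Nat.lt_succ_sqrt n.toNat)
  have h2 := Int.toNat_of_nonneg hn
  simp only [pvSqrt]
  push_cast [Nat.succ_eq_add_one] at h
  omega

lemma le_pvSqrt_iff (n j : Int) (hn : 0 ≤ n) (hj : 0 ≤ j) : j ≤ pvSqrt n ↔ j * j ≤ n := by
  constructor
  · intro h
    have h1 := pvSqrt_mul_le n hn
    have h0 := pvSqrt_nonneg n
    nlinarith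
  · intro h
    by_contra hc
    push Not at hc
    have h2 := lt_pvSqrt_succ n hn
    have h0 := pvSqrt_nonneg n
    nlinarith

-- exact division: (n // j) * j = n when n % j == 0
lemma fd_mul (n j : Int) (hm : PySem.Int.mod n j = 0) :
    PySem.Int.floordiv n j * j = n := by
  have h := PySem.Int.floordiv_mul_add_mod n j
  omega

lemma fd_pos (n j : Int) (h1 : 1 ≤ j) (hjj : j * j ≤ n) (hm : PySem.Int.mod n j = 0) :
    j ≤ PySem.Int.floordiv n j := by
  have hq := fd_mul n j hm
  nlinarith

lemma fresh_step (n a j : Int) (h1 : 1 ≤ a) (haj : a < j) (hjj : j * j ≤ n)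
    (hma : PySem.Int.mod n a = 0) (hmj : PySem.Int.mod n j = 0) :
    j ≠ PySem.Int.floordiv n a ∧ PySem.Int.floordiv n j ≠ a ∧
      PySem.Int.floordiv n j ≠ PySem.Int.floordiv n a := by
  have hqa := fd_mul n a hma
  have hqj := fd_mul n j hmj
  refine ⟨?_, ?_, ?_⟩
  · intro h; rw [← h] at hqa; nlinarith
  · intro h; rw [h] at hqj; nlinarith
  · intro h
    rw [h] at hqj
    have hq1 : 1 ≤ PySem.Int.floordiv n a := by nlinarith
    have : PySem.Int.floordiv n a * (j - a) = 0 := by nlinarith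
    have := mul_eq_zero.mp this
    omega

lemma foldA (n : Int) (hn : 0 ≤ n) : ∀ (k : Nat) (a : Int) (S₀ : List Int), 1 ≤ a →
    (pvSqrt n + 1 - a).toNat ≤ k →
    (∀ j, a ≤ j → j ≤ pvSqrt n → PySem.Int.mod n j = 0 →
      j ∉ S₀ ∧ PySem.Int.floordiv n j ∉ S₀) →
    (PySem.List.pyRange a (pvSqrt n + 1) 1).foldl (stepA n) S₀ = S₀ ++ divL n a := by
  intro k
  induction k with
  | zero =>
    intro a S₀ h1 hk _
    have hnil : PySem.List.pyRange a (pvSqrt n + 1) 1 = [] :=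
      PySem.List.pyRange_one_eq_nil (by omega)
    simp [divL, hnil]
  | succ k ih =>
    intro a S₀ h1 hk H
    by_cases hle : a ≤ pvSqrt n
    · have hcons : PySem.List.pyRange a (pvSqrt n + 1) 1 =
        a :: PySem.List.pyRange (a + 1) (pvSqrt n + 1) 1 :=
        PySem.List.pyRange_one_cons (by omega)
      have hdl : divL n a = (if PySem.Int.mod n a == 0 then pairL n a else []) ++ divL n (a + 1) := by
        simp [divL, hcons]
      rw [hcons]
      simp only [List.foldl_cons]
      by_cases hm : PySem.Int.mod n a = 0
      · have hfresh := H a le_rfl hle hm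
        have haa : a * a ≤ n := (le_pvSqrt_iff n a hn (by omega)).mp hle
        have hstep : stepA n S₀ a = S₀ ++ pairL n a := by
          unfold stepA pairL
          simp only [hm, beq_self_eq_true, if_true]
          rw [PySem.Set.add_of_not_mem hfresh.1]
          by_cases hq : PySem.Int.floordiv n a = a
          · rw [hq]
            simp [PySem.Set.add_of_mem]
          · rw [PySem.Set.add_of_not_mem (by
              simp only [List.mem_append, List.mem_singleton]
              push Not
              exact ⟨hfresh.2, hq⟩)]
            simp [hq]
        rw [hstep, hdl, ih (a + 1) (S₀ ++ pairL n a) (by omega) (by omega) ?_]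
        · simp [hm]
        · intro j hj1 hj2 hmj
          have hjj : j * j ≤ n := (le_pvSqrt_iff n j hn (by omega)).mp hj2
          have hHj := H j (by omega) hj2 hmj
          have hfr := fresh_step n a j h1 (by omega) hjj hm hmj
          have hqj := fd_pos n j (by omega) hjj hmj
          constructor
          · simp only [List.mem_append]
            push Not
            refine ⟨hHj.1, ?_⟩
            unfold pairL
            by_cases hq : PySem.Int.floordiv n a = a <;> simp [hq] <;> omega
          · simp only [List.mem_append]
            push Not
            refine ⟨hHj.2, ?_⟩
            unfold pairL
            by_cases hq : PySem.Int.floordiv n a = a <;> simp [hq] <;> omega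
      · have hstep : stepA n S₀ a = S₀ := by
          unfold stepA
          simp [hm]
        rw [hstep, hdl, ih (a + 1) S₀ (by omega) (by omega)
          (fun j hj1 hj2 hmj => H j (by omega) hj2 hmj)]
        simp [hm]
    · have hnil : PySem.List.pyRange a (pvSqrt n + 1) 1 = [] :=
        PySem.List.pyRange_one_eq_nil (by omega)
      simp [divL, hnil]

-- A's fold preserves nodup (the accumulator is a PySem.Set built with add)
lemma nodup_foldA (n : Int) (l : List Int) : ∀ s : PySem.Set Int, s.Nodup →
    (l.foldl (stepA n) s).Nodup := by
  induction l with
  | nil => intro s hs; exact hs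
  | cons i l ih =>
    intro s hs
    rw [List.foldl_cons]
    apply ih
    unfold stepA
    by_cases hm : PySem.Int.mod n i == 0
    · simp only [if_pos hm]
      apply PySem.Set.nodup_add
      apply PySem.Set.nodup_add
      exact hs
    · simp only [if_neg hm]
      exact hs

-- membership in A's divisor list = the divisor predicate
lemma mem_divL (n : Int) (hn : 0 ≤ n) (d : Int) :
    d ∈ divL n 1 ↔ 1 ≤ d ∧ d ≤ n ∧ d ∣ n := by
  constructor
  · intro hd
    rcases List.mem_flatMap.mp hd with ⟨i, hi, hdi⟩
    rcases (PySem.List.mem_pyRange_one).mp hi with ⟨hi1, hi2⟩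
    by_cases hm : PySem.Int.mod n i = 0
    · simp only [hm, beq_self_eq_true, if_true] at hdi
      have hii : i * i ≤ n := (le_pvSqrt_iff n i hn (by omega)).mp (by omega)
      have hq := fd_mul n i hm
      have hdvd : i ∣ n := (PySem.Int.mod_eq_zero_iff_dvd n i).mp hm
      unfold pairL at hdi
      have hcases : d = i ∨ d = PySem.Int.floordiv n i := by
        by_cases hqq : PySem.Int.floordiv n i = i <;> simp [hqq] at hdi <;> tauto
      rcases hcases with rfl | rfl
      · exact ⟨hi1, by nlinarith, hdvd⟩
      · have hp := fd_pos n i hi1 hii hm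
        refine ⟨by omega, by nlinarith, ⟨i, hq.symm⟩⟩
    · simp [hm] at hdi
  · rintro ⟨hd1, hdn, hdvd⟩
    have hn1 : 1 ≤ n := le_trans hd1 hdn
    have hmd : PySem.Int.mod n d = 0 := (PySem.Int.mod_eq_zero_iff_dvd n d).mpr hdvd
    by_cases hds : d ≤ pvSqrt n
    · refine List.mem_flatMap.mpr ⟨d, (PySem.List.mem_pyRange_one).mpr ⟨hd1, by omega⟩, ?_⟩
      simp only [hmd, beq_self_eq_true, if_true]
      unfold pairL
      by_cases hq : PySem.Int.floordiv n d = d <;> simp [hq]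
    · -- d is the large partner: it is num // e for e = num // d ≤ sqrt n
      set e := PySem.Int.floordiv n d with he
      have hq : e * d = n := fd_mul n d hmd
      have he1 : 1 ≤ e := by nlinarith
      have hdd : ¬ d * d ≤ n := fun hc => hds ((le_pvSqrt_iff n d hn (by omega)).mpr hc)
      have hed : e < d := by nlinarith
      have hee : e ≤ pvSqrt n := (le_pvSqrt_iff n e hn (by omega)).mpr (by nlinarith)
      have hme : PySem.Int.mod n e = 0 := (PySem.Int.mod_eq_zero_iff_dvd n e).mpr ⟨d, by omega⟩
      have hfe : PySem.Int.floordiv n e = d := by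
        have h2 := fd_mul n e hme
        have : (PySem.Int.floordiv n e - d) * e = 0 := by nlinarith
        rcases mul_eq_zero.mp this with h | h <;> omega
      refine List.mem_flatMap.mpr ⟨e, (PySem.List.mem_pyRange_one).mpr ⟨he1, by omega⟩, ?_⟩
      simp only [hme, beq_self_eq_true, if_true]
      unfold pairL
      rw [hfe, if_neg (by omega)]
      simp

lemma nodup_divL (n : Int) (hn : 0 ≤ n) : (divL n 1).Nodup := by
  have h := foldA n hn (pvSqrt n + 1 - 1).toNat 1 [] le_rfl le_rfl
    (by intro j _ _ _; exact ⟨by simp, by simp⟩)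
  have h2 := nodup_foldA n (PySem.List.pyRange 1 (pvSqrt n + 1) 1) PySem.Set.empty (by simp [PySem.Set.empty])
  rw [show (PySem.Set.empty : PySem.Set Int) = ([] : List Int) from rfl, h] at h2
  simpa using h2


-- ---------- B-side machinery: factorization correctness and divisor generation ----------

-- divisor list generated from a factor list, starting from [1]
def genList (l : List (Int × Int)) : List Int := l.foldl genStep [1]

-- what a correct factor list of m guarantees about the generated divisor list
def GS (m : Int) (l : List (Int × Int)) : Prop :=
  (genList l).Nodup ∧ ∀ d, d ∈ genList l ↔ 1 ≤ d ∧ d ∣ m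

lemma gen_acc : ∀ (l : List (Int × Int)) (acc : List Int),
    l.foldl genStep acc = acc.flatMap (fun d => (genList l).map (fun x => d * x)) := by
  intro l
  induction l with
  | nil =>
      intro acc
      simp [genList]
  | cons pe t ih =>
      intro acc
      rw [List.foldl_cons, ih]
      conv_rhs => rw [genList, List.foldl_cons, ih (genStep [1] pe)]
      simp [genStep, List.flatMap_map, List.map_flatMap, List.flatMap_assoc, List.map_map, mul_assoc]

lemma genList_cons (p e : Int) (l : List (Int × Int)) :
    genList ((p, e) :: l) =
      (PySem.List.pyRange 0 (e + 1) 1).flatMap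
        (fun k => (genList l).map (fun x => (1 * p ^ k.toNat) * x)) := by
  conv_lhs => rw [genList, List.foldl_cons, gen_acc]
  simp [genStep, List.flatMap_map]

-- splitting a divisor of p^e * m along the prime p
lemma dvd_pp_mul (p : Int) (hp : Prime p) :
    ∀ (e : Nat) (m x : Int), x ∣ p ^ e * m → ∃ k, k ≤ e ∧ ∃ z, z ∣ m ∧ x = p ^ k * z := by
  intro e
  induction e with
  | zero =>
      intro m x hx
      exact ⟨0, le_rfl, x, by simpa using hx, by simp⟩
  | succ e ih =>
      intro m x hx
      by_cases hpx : p ∣ x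
      · obtain ⟨x1, rfl⟩ := hpx
        have hx1 : x1 ∣ p ^ e * m := by
          have h : p * x1 ∣ p * (p ^ e * m) := by
            have : p ^ (e + 1) * m = p * (p ^ e * m) := by ring
            rwa [this] at hx
          exact (mul_dvd_mul_iff_left hp.ne_zero).mp h
        obtain ⟨k, hk, z, hz, rfl⟩ := ih m x1 hx1
        exact ⟨k + 1, by omega, z, hz, by ring⟩
      · have hcop : IsCoprime x p := ((hp.coprime_iff_not_dvd).mpr hpx).symm
        have hcop2 : IsCoprime x (p ^ (e + 1)) := hcop.pow_right
        have hxm : x ∣ m := hcop2.dvd_of_dvd_mul_left hx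
        exact ⟨0, by omega, x, hxm, by simp⟩

-- (k, z) with p ∤ z is uniquely determined by p^k * z
lemma pp_inj (p : Int) (hp0 : p ≠ 0) :
    ∀ (k1 k2 : Nat) (z1 z2 : Int), ¬ p ∣ z1 → ¬ p ∣ z2 →
      p ^ k1 * z1 = p ^ k2 * z2 → k1 = k2 ∧ z1 = z2 := by
  intro k1
  induction k1 with
  | zero =>
      intro k2 z1 z2 h1 h2 he
      cases k2 with
      | zero => simpa using he
      | succ k2 =>
          exfalso
          apply h1
          refine ⟨p ^ k2 * z2, ?_⟩
          have hz : z1 = p ^ (k2 + 1) * z2 := by simpa using he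
          rw [hz]; ring
  | succ k1 ih =>
      intro k2 z1 z2 h1 h2 he
      cases k2 with
      | zero =>
          exfalso
          apply h2
          refine ⟨p ^ k1 * z1, ?_⟩
          have hz : z2 = p ^ (k1 + 1) * z1 := by simpa using he.symm
          rw [hz]; ring
      | succ k2 =>
          have h : p * (p ^ k1 * z1) = p * (p ^ k2 * z2) := by
            have e1 : p * (p ^ k1 * z1) = p ^ (k1 + 1) * z1 := by ring
            have e2 : p * (p ^ k2 * z2) = p ^ (k2 + 1) * z2 := by ring
            rw [e1, e2, he]
          obtain ⟨hk, hz⟩ := ih k2 z1 z2 h1 h2 (mul_left_cancel₀ hp0 h)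
          exact ⟨by omega, hz⟩

-- flatMap of maps over two nodup lists with a pairwise-injective combiner is nodup
lemma nodup_flatMap_map {α β γ : Type} (l1 : List α) (l2 : List β) (g : α → β → γ)
    (h1 : l1.Nodup) (h2 : l2.Nodup)
    (hinj : ∀ a1 ∈ l1, ∀ a2 ∈ l1, ∀ b1 ∈ l2, ∀ b2 ∈ l2, g a1 b1 = g a2 b2 → a1 = a2 ∧ b1 = b2) :
    (l1.flatMap (fun a => l2.map (g a))).Nodup := by
  induction l1 with
  | nil => simp
  | cons a t ih =>
      rw [List.flatMap_cons]
      rcases List.nodup_cons.mp h1 with ⟨hat, ht⟩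
      refine List.Nodup.append ?_ ?_ ?_
      · exact h2.map_on (fun b1 hb1 b2 hb2 hg =>
          (hinj a (by simp) a (by simp) b1 hb1 b2 hb2 hg).2)
      · exact ih ht (fun a1 ha1 a2 ha2 b1 hb1 b2 hb2 hg =>
          hinj a1 (by simp [ha1]) a2 (by simp [ha2]) b1 hb1 b2 hb2 hg)
      · intro x hx hx'
        rcases List.mem_map.mp hx with ⟨b1, hb1, rfl⟩
        rcases List.mem_flatMap.mp hx' with ⟨a2, ha2, hx2⟩
        rcases List.mem_map.mp hx2 with ⟨b2, hb2, hg⟩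
        have := (hinj a (by simp) a2 (by simp [ha2]) b1 hb1 b2 hb2 hg.symm).1
        exact hat (this ▸ ha2)

lemma GS_nil : GS 1 [] := by
  constructor
  · simp [genList]
  · intro d
    simp only [genList, List.foldl_nil, List.mem_singleton]
    constructor
    · rintro rfl; exact ⟨le_rfl, dvd_refl 1⟩
    · rintro ⟨hd, hdvd⟩
      exact (Int.eq_one_of_dvd_one (by omega) hdvd)

lemma GS_cons (p e m : Int) (hp2 : 2 ≤ p) (hp : Prime p) (he : 1 ≤ e) (_hm : 1 ≤ m)
    (hnd : ¬ p ∣ m) (l : List (Int × Int)) (h : GS m l) :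
    GS (p ^ e.toNat * m) ((p, e) :: l) := by
  obtain ⟨hnodup, hmem⟩ := h
  rw [GS, genList_cons]
  have hzp : ∀ z ∈ genList l, ¬ p ∣ z := by
    intro z hz hpz
    exact hnd (dvd_trans hpz ((hmem z).mp hz).2)
  constructor
  · apply nodup_flatMap_map _ _ _ (PySem.List.nodup_pyRange_one 0 (e + 1)) hnodup
    intro k1 hk1 k2 hk2 z1 hz1 z2 hz2 hg
    have hb1 := (PySem.List.mem_pyRange_one).mp hk1
    have hb2 := (PySem.List.mem_pyRange_one).mp hk2
    have hu := pp_inj p hp.ne_zero k1.toNat k2.toNat z1 z2 (hzp z1 hz1) (hzp z2 hz2)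
      (by rw [one_mul, one_mul] at hg; exact hg)
    exact ⟨by omega, hu.2⟩
  · intro d
    rw [List.mem_flatMap]
    constructor
    · rintro ⟨k, hk, hd⟩
      rcases List.mem_map.mp hd with ⟨z, hz, rfl⟩
      have hb := (PySem.List.mem_pyRange_one).mp hk
      obtain ⟨hz1, hzm⟩ := (hmem z).mp hz
      have hpow1 : (1 : Int) ≤ p ^ k.toNat := one_le_pow₀ (by omega)
      refine ⟨by nlinarith, ?_⟩
      rw [one_mul]
      exact mul_dvd_mul (pow_dvd_pow p (by omega)) hzm
    · rintro ⟨hd1, hdvd⟩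
      obtain ⟨k, hke, z, hzm, rfl⟩ := dvd_pp_mul p hp e.toNat m d hdvd
      have hpow1 : (1 : Int) ≤ p ^ k := one_le_pow₀ (by omega)
      have hz1 : 1 ≤ z := by nlinarith
      refine ⟨(k : Int), (PySem.List.mem_pyRange_one).mpr ⟨by omega, by omega⟩, ?_⟩
      refine List.mem_map.mpr ⟨z, (hmem z).mpr ⟨hz1, hzm⟩, ?_⟩
      simp

lemma GS_prime (q : Int) (hq2 : 2 ≤ q) (hq : Prime q) : GS q [(q, 1)] := by
  have h := GS_cons q 1 1 hq2 hq le_rfl le_rfl hq.not_dvd_one [] GS_nil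
  simpa using h

-- trial division invariant: p divides m and nothing in [2, p) does, so p is prime
lemma least_divisor_prime (p m : Int) (hp2 : 2 ≤ p) (hpm : p ∣ m)
    (hinv : ∀ q, 2 ≤ q → q < p → ¬ q ∣ m) : Prime p := by
  rw [Int.prime_iff_natAbs_prime]
  have hpn : ((p.natAbs : Nat) : Int) = p := Int.natAbs_of_nonneg (by omega)
  set n := p.natAbs with hn
  have hn2 : 2 ≤ n := by omega
  by_contra hnp
  have hq0p : n.minFac ∣ n := Nat.minFac_dvd n
  have hq0prime : (n.minFac).Prime := Nat.minFac_prime (by omega)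
  have hq02 : 2 ≤ n.minFac := hq0prime.two_le
  have hq0n : n.minFac ≠ n := fun hc => hnp (Nat.prime_def_minFac.mpr ⟨hn2, hc⟩)
  have hq0le : n.minFac ≤ n := Nat.minFac_le (by omega)
  have hdint : ((n.minFac : Nat) : Int) ∣ m :=
    dvd_trans (by rw [← hpn]; exact Int.natCast_dvd_natCast.mpr hq0p) hpm
  exact hinv (n.minFac : Int) (by omega) (by omega) hdint

-- after the loop: m > 1 has no divisor in [2, p) and p*p > m, so m is prime
lemma tail_prime (p m : Int) (hp2 : 2 ≤ p) (hm : 1 < m) (hsm : ¬ p * p ≤ m)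
    (hinv : ∀ q, 2 ≤ q → q < p → ¬ q ∣ m) : Prime m := by
  rw [Int.prime_iff_natAbs_prime]
  have hmn : ((m.natAbs : Nat) : Int) = m := Int.natAbs_of_nonneg (by omega)
  set n := m.natAbs with hn
  have hn2 : 2 ≤ n := by omega
  by_contra hnp
  have hq0p : n.minFac ∣ n := Nat.minFac_dvd n
  have hq0prime : (n.minFac).Prime := Nat.minFac_prime (by omega)
  have hq02 : 2 ≤ n.minFac := hq0prime.two_le
  have hsq : n.minFac ^ 2 ≤ n := Nat.minFac_sq_le_self (by omega) hnp
  have hdint : ((n.minFac : Nat) : Int) ∣ m := by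
    rw [← hmn]; exact Int.natCast_dvd_natCast.mpr hq0p
  by_cases hlt : (n.minFac : Int) < p
  · exact hinv (n.minFac : Int) (by omega) hlt hdint
  · apply hsm
    have h1 : p * p ≤ (n.minFac : Int) * (n.minFac : Int) := by nlinarith
    have h2 : ((n.minFac * n.minFac : Nat) : Int) ≤ ((n : Nat) : Int) := by
      exact_mod_cast Int.ofNat_le.mpr (by nlinarith [hsq])
    push_cast at h2
    omega
  
-- division bound used by the loop-invariant proofs below
lemma pv_ediv_bounds (p m : Int) (hp : 2 ≤ p) (hm : 1 ≤ m) : m / p < m ∧ 0 ≤ m / p := by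
  constructor
  · apply Int.ediv_lt_of_lt_mul (by omega)
    nlinarith
  · exact Int.ediv_nonneg (by omega) (by omega)

-- the inner loop divides out exactly the full power of p
lemma pvStrip_spec : ∀ (fuel : Nat) (p m e : Int), 2 ≤ p → 1 ≤ m → m.toNat ≤ fuel →
    ∃ k : Nat, (pvStrip p m e fuel).1 = e + k ∧ m = p ^ k * (pvStrip p m e fuel).2 ∧
      ¬ p ∣ (pvStrip p m e fuel).2 ∧ 1 ≤ (pvStrip p m e fuel).2 ∧ (p ∣ m → 1 ≤ k) := by
  intro fuel
  induction fuel with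
  | zero => intro p m e hp hm hf; omega
  | succ fuel ih =>
    intro p m e hp hm hf
    by_cases hd : (PySem.Int.mod m p == 0) = true
    · have hdvd : p ∣ m := (PySem.Int.mod_eq_zero_iff_dvd m p).mp (by simpa using hd)
      have hfd : PySem.Int.floordiv m p = m / p := PySem.Int.floordiv_eq_ediv_of_pos (by omega)
      have hmp : m / p * p = m := Int.ediv_mul_cancel hdvd
      have hge : p ≤ m := Int.le_of_dvd (by omega) hdvd
      have h1 : 1 ≤ m / p := by
        have := Int.le_ediv_iff_mul_le (a := 1) (b := m) (c := p) (by omega)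
        omega
      have hlt : m / p < m := (pv_ediv_bounds p m hp hm).1
      rw [pvStrip, if_pos hd, hfd]
      obtain ⟨k, hk1, hk2, hk3, hk4, _⟩ := ih p (m / p) (e + 1) hp h1 (by omega)
      refine ⟨k + 1, ?_, ?_, hk3, hk4, fun _ => by omega⟩
      · rw [hk1]; push_cast; ring
      · rw [pow_succ]
        calc m = m / p * p := hmp.symm
        _ = p ^ k * (pvStrip p (m / p) (e + 1) fuel).2 * p := by rw [← hk2]
        _ = p ^ k * p * (pvStrip p (m / p) (e + 1) fuel).2 := by ring
    · have hnd : ¬ p ∣ m := fun hc => hd (by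
        simp [(PySem.Int.mod_eq_zero_iff_dvd m p).mpr hc])
      rw [pvStrip, if_neg hd]
      exact ⟨0, by simp, by simp, hnd, by omega, fun hc => absurd hc hnd⟩

-- terminal state of the outer loop
lemma GS_tail (p m : Int) (hp : 2 ≤ p) (hm : 1 ≤ m) (hnp : ¬ p * p ≤ m)
    (hinv : ∀ q, 2 ≤ q → q < p → ¬ q ∣ m) :
    GS m ([] ++ (if 1 < m then [(m, 1)] else [])) := by
  by_cases h1 : 1 < m
  · simp only [if_pos h1, List.nil_append]
    exact GS_prime m (by omega) (tail_prime p m hp h1 hnp hinv)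
  · have hm1 : m = 1 := by omega
    subst hm1
    simpa using GS_nil

-- main invariant of the outer trial-division loop: enough fuel, p ≥ 2, m ≥ 1, and no
-- divisor of m below p means the generated divisor list is exactly the divisors of m
lemma fac_master : ∀ (fuel : Nat) (p m : Int) (fac : List (Int × Int)), 2 ≤ p → 1 ≤ m →
    (m + 2 - p).toNat ≤ fuel → (∀ q, 2 ≤ q → q < p → ¬ q ∣ m) →
    ∃ sfx, (pvFacAux p m fac fuel).1 = fac ++ sfx ∧ 1 ≤ (pvFacAux p m fac fuel).2 ∧
      GS m (sfx ++ (if 1 < (pvFacAux p m fac fuel).2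
        then [((pvFacAux p m fac fuel).2, 1)] else [])) := by
  intro fuel
  induction fuel with
  | zero =>
      intro p m fac hp hm hf hinv
      have hp3 : m + 2 ≤ p := by omega
      have hnp : ¬ p * p ≤ m := by intro hc; nlinarith
      exact ⟨[], by simp [pvFacAux], by rw [pvFacAux]; exact hm,
        by simp only [pvFacAux]; exact GS_tail p m hp hm hnp hinv⟩
  | succ fuel ih =>
      intro p m fac hp hm hf hinv
      by_cases hpp : p * p ≤ m
      · by_cases hd : (PySem.Int.mod m p == 0) = true
        · have hdvd : p ∣ m := (PySem.Int.mod_eq_zero_iff_dvd m p).mp (by simpa using hd)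
          obtain ⟨k, hs1, hs2, hs3, hs4, hs5⟩ := pvStrip_spec m.toNat p m 0 hp hm le_rfl
          set sp := pvStrip p m 0 m.toNat with hsp
          have hk1 : 1 ≤ k := hs5 hdvd
          have hprime : Prime p := least_divisor_prime p m hp hdvd hinv
          have hrec : pvFacAux p m fac (fuel + 1) =
              pvFacAux (p + 1) sp.2 (fac ++ [(p, sp.1)]) fuel := by
            rw [pvFacAux, if_pos hpp, if_pos hd]
          have hpk1 : (1 : Int) ≤ p ^ k := one_le_pow₀ (by omega)
          have hm2le : sp.2 ≤ m := by nlinarith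
          have hinv2 : ∀ q, 2 ≤ q → q < p + 1 → ¬ q ∣ sp.2 := by
            intro q hq2 hqp hqd
            by_cases hqp2 : q < p
            · exact hinv q hq2 hqp2 (hqd.trans ⟨p ^ k, by rw [hs2]; ring⟩)
            · have hq : q = p := by omega
              subst hq
              exact hs3 hqd
          have hm0 : 0 ≤ m := by omega
          have h2p : 2 * p ≤ m + 1 := by nlinarith [sq_nonneg (p - 1)]
          obtain ⟨sfx, h1, h2, h3⟩ := ih (p + 1) sp.2
            (fac ++ [(p, sp.1)]) (by omega) hs4 (by omega) hinv2
          refine ⟨(p, sp.1) :: sfx, ?_, ?_, ?_⟩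
          · rw [hrec, h1]; simp
          · rw [hrec]; exact h2
          · rw [hrec, List.cons_append]
            have he : sp.1 = (k : Int) := by rw [hs1]; ring
            have heto : (sp.1).toNat = k := by rw [he]; simp
            have hGS := GS_cons p (sp.1) sp.2 hp hprime
              (by rw [he]; exact_mod_cast hk1) hs4 hs3 _ h3
            rw [heto] at hGS
            rw [show m = p ^ k * sp.2 from hs2]
            exact hGS
        · have hrec : pvFacAux p m fac (fuel + 1) = pvFacAux (p + 1) m fac fuel := by
            rw [pvFacAux, if_pos hpp, if_neg hd]
          have hnd : ¬ p ∣ m := fun hc => hd (by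
            simp [(PySem.Int.mod_eq_zero_iff_dvd m p).mpr hc])
          have hinv2 : ∀ q, 2 ≤ q → q < p + 1 → ¬ q ∣ m := by
            intro q hq2 hqp
            by_cases hqp2 : q < p
            · exact hinv q hq2 hqp2
            · have hq : q = p := by omega
              subst hq
              exact hnd
          have hm0 : 0 ≤ m := le_trans (mul_self_nonneg p) hpp
          have h2p : 2 * p ≤ m + 1 := by nlinarith [sq_nonneg (p - 1)]
          obtain ⟨sfx, h1, h2, h3⟩ := ih (p + 1) m fac (by omega) hm (by omega) hinv2
          exact ⟨sfx, by rw [hrec]; exact h1, by rw [hrec]; exact h2, by rw [hrec]; exact h3⟩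
      · have hprod : pvFacAux p m fac (fuel + 1) = (fac, m) := by
          rw [pvFacAux, if_neg hpp]
        exact ⟨[], by rw [hprod]; simp, by rw [hprod]; exact hm,
          by simp only [hprod]; exact GS_tail p m hp hm hpp hinv⟩

-- ===== VERDICT (by name: the statement is the Claim_ definition above) =====
theorem f_spec : Claim_equal_f := by
  intro num hdom hpre
  show f num = f_alt num
  have hnn : (0 : Int) ≤ num := hpre
  by_cases hz : num = 0
  · subst hz
    decide
  · have hpos : 1 ≤ num := by omega
    -- A's fold builds divL, the divisors in pairing order
    have hres : (PySem.List.pyRange 1 (pvSqrt num + 1) 1).foldl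
        (fun r i =>
          if PySem.Int.mod num i == 0 then
            PySem.Set.add (PySem.Set.add r i) (PySem.Int.floordiv num i)
          else r) PySem.Set.empty = divL num 1 :=
      foldA num hnn (pvSqrt num + 1 - 1).toNat 1 [] le_rfl le_rfl
        (by intro j _ _ _; exact ⟨by simp, by simp⟩)
    -- B's factorization generates the same divisors
    obtain ⟨sfx, h1, h2, h3⟩ := fac_master (num + 2).toNat 2 num [] le_rfl hpos (by omega)
      (by intro q hq2 hqlt; omega)
    rw [List.nil_append] at h1
    obtain ⟨hnd, hmm⟩ := h3
    have hperm2 : (genList (sfx ++ if 1 < (pvFacAux 2 num [] (num + 2).toNat).2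
        then [((pvFacAux 2 num [] (num + 2).toNat).2, 1)] else [])).Perm (divL num 1) := by
      refine (List.perm_ext_iff_of_nodup hnd (nodup_divL num hnn)).mpr ?_
      intro d
      rw [hmm d, mem_divL num hnn d]
      constructor
      · rintro ⟨hd1, hdd⟩
        exact ⟨hd1, Int.le_of_dvd (by omega) hdd, hdd⟩
      · rintro ⟨hd1, _, hdd⟩
        exact ⟨hd1, hdd⟩
    have hperm : (PySem.List.sorted (divL num 1) (fun x => x) false).Perm
        (genList (sfx ++ if 1 < (pvFacAux 2 num [] (num + 2).toNat).2
          then [((pvFacAux 2 num [] (num + 2).toNat).2, 1)] else [])) :=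
      (PySem.List.sorted_perm ..).trans hperm2.symm
    have hP := hperm.filter (fun i => is_prime i)
    have hE := hperm.filter (fun i => PySem.Int.mod i 2 == 0)
    have hdivs : (if 1 < (pvFacAux 2 num [] (num + 2).toNat).2
        then (pvFacAux 2 num [] (num + 2).toNat).1 ++ [((pvFacAux 2 num [] (num + 2).toNat).2, 1)]
        else (pvFacAux 2 num [] (num + 2).toNat).1).foldl genStep [1]
        = genList (sfx ++ if 1 < (pvFacAux 2 num [] (num + 2).toNat).2
            then [((pvFacAux 2 num [] (num + 2).toNat).2, 1)] else []) := by
      rw [h1, genList]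
      by_cases hc : 1 < (pvFacAux 2 num [] (num + 2).toNat).2 <;> simp [hc]
    unfold f f_alt
    simp only [hres, if_pos (show (0:Int) < num by omega), hdivs]
    rw [hP.length_eq, hE.length_eq, hP.sum_eq, hE.sum_eq]
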